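-- pv_equiv track=rewrite | github.com/minwookhan/ksl | mfc_server/scripts/CP/changepointDetect.py | findSignificantMaxs
-- ===== SOURCE A (Python) =====
-- def findSignificantMaxs(minarr, maxarr, valarr):
--     mins = [(i, 'min') for i in minarr]
--     maxs = [(i, 'max') for i in maxarr]
--     mms = mins + maxs
--     mms.sort(key=lambda element : element[0])
--     new_maxarr = []
--
--     sigMax = None
--     sigMaxValue = 0
--     for (frame, kind) in mms:
--         if kind =='min':
--             if sigMax:
--                 new_maxarr.append(sigMax)
--             sigMax = None
--             sigMaxValue = 0
--         else:
--             if sigMaxValue <= valarr[frame]: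
--                 sigMax = frame
--                 sigMaxValue = valarr[frame]
--     new_maxarr.append(sigMax)
--     return new_maxarr
-- ===== SOURCE B (Python) =====
-- def findSignificantMaxs(minarr, maxarr, valarr):
--     def best(fs):
--         b, bv = None, 0
--         for f in fs:
--             if bv <= valarr[f]:
--                 b, bv = f, valarr[f]
--         return b
--
--     maxs = sorted(maxarr)
--     out = []
--     for m in sorted(minarr):
--         i = 0
--         while i < len(maxs) and maxs[i] < m:
--             i += 1
--         b = best(maxs[:i])
--         maxs = maxs[i:]
--         if b:
--             out.append(b)
--     out.append(best(maxs))
--     return out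
-- ===== Notes on version B (the rewrite author's own statement) =====
-- stated objective: alternative
-- what changed: Instead of tagging every frame, sorting the merged event list and running one reset-on-min scan, B sorts the min and max frame lists separately and walks the sorted mins, splitting off the prefix of sorted maxes below each min boundary and taking a per-segment best with the <=/later-wins rule; no tagged tuples or merged list are ever built.
import Mathlib
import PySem

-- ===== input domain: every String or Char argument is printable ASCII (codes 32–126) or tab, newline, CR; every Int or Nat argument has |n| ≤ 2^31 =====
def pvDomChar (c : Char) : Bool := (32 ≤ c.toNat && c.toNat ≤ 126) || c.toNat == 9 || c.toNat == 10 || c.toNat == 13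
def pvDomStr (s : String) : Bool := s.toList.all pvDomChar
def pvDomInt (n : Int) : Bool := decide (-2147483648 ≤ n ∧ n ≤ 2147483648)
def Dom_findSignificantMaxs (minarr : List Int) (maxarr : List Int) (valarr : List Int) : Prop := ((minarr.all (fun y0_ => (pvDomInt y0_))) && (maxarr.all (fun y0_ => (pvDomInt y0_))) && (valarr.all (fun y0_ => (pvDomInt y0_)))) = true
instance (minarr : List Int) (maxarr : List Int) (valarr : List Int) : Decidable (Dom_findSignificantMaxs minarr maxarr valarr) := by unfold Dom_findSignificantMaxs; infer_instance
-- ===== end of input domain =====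

-- B replaces A's tagged-and-merged event scan by sorting mins and maxes separately and
-- taking a per-segment best between consecutive min boundaries (objective: alternative).

-- Python truthiness of an Optional[int]: None and 0 are falsy.
def pvTruthy : Option Int → Bool
  | none => false
  | some v => v != 0

-- ===== PORT A =====
-- the 'min'/'max' string tag is a two-valued marker; ported as a Bool (true = 'min')
def findSignificantMaxs (minarr : List Int) (maxarr : List Int) (valarr : List Int) : List (Option Int) :=
  let mins := minarr.map (fun i => (i, true))
  let maxs := maxarr.map (fun i => (i, false))
  let mms := PySem.List.sorted (mins ++ maxs) (fun e => e.1) false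
  let r := mms.foldl
    (fun (st : List (Option Int) × Option Int × Int) e =>
      if e.2 then
        ((if pvTruthy st.2.1 then st.1 ++ [st.2.1] else st.1), none, 0)
      else
        if st.2.2 ≤ PySem.List.pyGetD valarr e.1 0 then
          (st.1, some e.1, PySem.List.pyGetD valarr e.1 0)
        else st)
    ([], none, 0)
  r.1 ++ [r.2.1]

-- ===== PORT B =====
-- best(fs): the running best-frame loop (later max wins ties via <=)
def pvSegBest (valarr : List Int) (fs : List Int) : Option Int :=
  (fs.foldl
    (fun (p : Option Int × Int) f =>
      if p.2 ≤ PySem.List.pyGetD valarr f 0 then (some f, PySem.List.pyGetD valarr f 0) else p)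
    (none, 0)).1

-- the index-scan split 'while i < len(maxs) and maxs[i] < m' + maxs[:i]/maxs[i:]
def pvSplitLt (m : Int) : List Int → List Int × List Int
  | [] => ([], [])
  | x :: t => if x < m then let p := pvSplitLt m t; (x :: p.1, p.2) else ([], x :: t)

-- the 'for m in sorted(minarr)' loop with accumulator out
def pvGo (valarr : List Int) : List Int → List Int → List (Option Int) → List (Option Int)
  | [], maxs, out => out ++ [pvSegBest valarr maxs]
  | m :: ms, maxs, out =>
      let p := pvSplitLt m maxs
      let b := pvSegBest valarr p.1
      pvGo valarr ms p.2 (if pvTruthy b then out ++ [b] else out)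

def findSignificantMaxs_alt (minarr : List Int) (maxarr : List Int) (valarr : List Int) : List (Option Int) :=
  pvGo valarr (PySem.List.sorted minarr (fun x => x) false) (PySem.List.sorted maxarr (fun x => x) false) []

-- ===== PRECONDITION & SPEC =====
-- A indexes valarr by every max frame; out-of-range frames raise IndexError in Python.
def Pre_findSignificantMaxs (minarr : List Int) (maxarr : List Int) (valarr : List Int) : Prop :=
  ∀ f ∈ maxarr, PySem.Raise.InRange valarr.length f
instance (minarr : List Int) (maxarr : List Int) (valarr : List Int) : Decidable (Pre_findSignificantMaxs minarr maxarr valarr) := by unfold Pre_findSignificantMaxs; infer_instance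

def pvWitness_findSignificantMaxs : List Int × List Int × List Int := ([2], [1, 3], [5, 5, 5, 7])

def Spec_findSignificantMaxs (minarr : List Int) (maxarr : List Int) (valarr : List Int) (out : List (Option Int)) : Prop := out = findSignificantMaxs_alt minarr maxarr valarr
instance (minarr : List Int) (maxarr : List Int) (valarr : List Int) (out : List (Option Int)) : Decidable (Spec_findSignificantMaxs minarr maxarr valarr out) := by unfold Spec_findSignificantMaxs; infer_instance

-- ===== CLAIM (what is proved, stated in full; the proofs are below) =====
def Claim_equal_findSignificantMaxs : Prop := ∀ (minarr : List Int) (maxarr : List Int) (valarr : List Int), Dom_findSignificantMaxs minarr maxarr valarr → Pre_findSignificantMaxs minarr maxarr valarr → Spec_findSignificantMaxs minarr maxarr valarr (findSignificantMaxs minarr maxarr valarr)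

-- ===== LEMMAS AND PROOFS =====

-- the stable merge of the two sorted frame lists, mins first at equal frames
def pvMerge : List Int → List Int → List (Int × Bool)
  | [], xs => xs.map (fun x => (x, false))
  | m :: ms, [] => (m, true) :: pvMerge ms []
  | m :: ms, x :: xs =>
      if x < m then (x, false) :: pvMerge (m :: ms) xs
      else (m, true) :: pvMerge ms (x :: xs)
  termination_by ms xs => ms.length + xs.length

lemma pvMerge_nil (xs : List Int) : pvMerge [] xs = xs.map (fun x => (x, false)) := by
  rw [pvMerge]

lemma pvMerge_cons_nil (m : Int) (ms : List Int) : pvMerge (m :: ms) [] = (m, true) :: pvMerge ms [] := by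
  rw [pvMerge]

lemma pvMerge_cons_cons (m x : Int) (ms xs : List Int) :
    pvMerge (m :: ms) (x :: xs)
      = if x < m then (x, false) :: pvMerge (m :: ms) xs else (m, true) :: pvMerge ms (x :: xs) := by
  rw [pvMerge]

lemma pvMerge_nil_right (ms : List Int) : pvMerge ms [] = ms.map (fun m => (m, true)) := by
  induction ms with
  | nil => rw [pvMerge_nil]; rfl
  | cons m ms ih => rw [pvMerge_cons_nil, ih]; rfl

lemma pvInsertBy_nil {α : Type} (p : α → α → Bool) (x : α) : PySem.List.insertBy p x [] = [x] := rfl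

lemma pvInsertBy_cons {α : Type} (p : α → α → Bool) (x y : α) (ys : List α) :
    PySem.List.insertBy p x (y :: ys)
      = if p x y then x :: y :: ys else y :: PySem.List.insertBy p x ys := rfl

-- inserting a tagged max into a tagged-max list = tagging the plain insertion
lemma pvInsert_mapF (l : List Int) (y : Int) :
    PySem.List.insertBy (fun a b : Int × Bool => decide (a.1 < b.1)) (y, false)
        (l.map (fun x => (x, false)))
      = (PySem.List.insertBy (fun a b : Int => decide (a < b)) y l).map (fun x => (x, false)) := by
  induction l with
  | nil => rfl
  | cons x xs ih =>
      simp only [List.map_cons, pvInsertBy_cons]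
      by_cases h : y < x
      · simp [h]
      · simp [h, ih]

-- A's state-step function (the body of A's foldl)
def pvStepA (valarr : List Int) (st : List (Option Int) × Option Int × Int) (e : Int × Bool) :
    List (Option Int) × Option Int × Int :=
  if e.2 then
    ((if pvTruthy st.2.1 then st.1 ++ [st.2.1] else st.1), none, 0)
  else
    if st.2.2 ≤ PySem.List.pyGetD valarr e.1 0 then
      (st.1, some e.1, PySem.List.pyGetD valarr e.1 0)
    else st

-- B's per-segment best-step function (the body of pvSegBest's foldl)
def pvStepB (valarr : List Int) (p : Option Int × Int) (f : Int) : Option Int × Int :=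
  if p.2 ≤ PySem.List.pyGetD valarr f 0 then (some f, PySem.List.pyGetD valarr f 0) else p

lemma findSignificantMaxs_eq (minarr maxarr valarr : List Int) :
    findSignificantMaxs minarr maxarr valarr =
      (let r := (PySem.List.sorted (minarr.map (fun i => (i, true)) ++ maxarr.map (fun i => (i, false)))
          (fun e => e.1) false).foldl (pvStepA valarr) ([], none, 0)
       r.1 ++ [r.2.1]) := rfl

-- inserting a tagged min into a tagged-min list = tagging the plain insertion
lemma pvInsert_mapT (l : List Int) (m : Int) :
    PySem.List.insertBy (fun a b : Int × Bool => decide (a.1 < b.1)) (m, true)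
        (l.map (fun i => (i, true)))
      = (PySem.List.insertBy (fun a b : Int => decide (a < b)) m l).map (fun i => (i, true)) := by
  induction l with
  | nil => rfl
  | cons y ys ih =>
      simp only [List.map_cons, PySem.List.insertBy]
      by_cases h : m < y
      · simp [h]
      · simp [h, ih]

-- inserting a tagged max into a merged list = merging with the plain insertion
lemma pvInsert_merge (ms : List Int) : ∀ (xs : List Int) (y : Int),
    PySem.List.insertBy (fun a b : Int × Bool => decide (a.1 < b.1)) (y, false) (pvMerge ms xs)
      = pvMerge ms (PySem.List.insertBy (fun a b : Int => decide (a < b)) y xs) := by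
  induction ms with
  | nil =>
      intro xs y
      rw [pvMerge_nil, pvMerge_nil]
      exact pvInsert_mapF xs y
  | cons m ms ihm =>
      intro xs y
      induction xs with
      | nil =>
          rw [pvMerge_cons_nil, pvInsertBy_nil, pvInsertBy_cons, pvMerge_cons_cons]
          by_cases h : y < m
          · simp only [h, decide_true, if_true]
            rw [pvMerge_cons_nil]
          · simp only [h, decide_false, Bool.false_eq_true, if_false]
            rw [ihm [] y, pvInsertBy_nil]
      | cons x xs ihx =>
          rw [pvMerge_cons_cons, pvInsertBy_cons]
          by_cases hxm : x < m
          · rw [if_pos hxm, pvInsertBy_cons]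
            by_cases hyx : y < x
            · simp only [hyx, decide_true, if_true]
              rw [pvMerge_cons_cons m y ms (x :: xs), if_pos (by omega : y < m),
                pvMerge_cons_cons m x ms xs, if_pos hxm]
            · simp only [hyx, decide_false, Bool.false_eq_true, if_false]
              rw [ihx, pvMerge_cons_cons m x ms _, if_pos hxm]
          · rw [if_neg hxm, pvInsertBy_cons]
            by_cases hym : y < m
            · have hyx : y < x := by omega
              rw [if_pos (by simpa using hym),
                if_pos (by simpa using hyx), pvMerge_cons_cons m y ms (x :: xs), if_pos hym,
                pvMerge_cons_cons m x ms xs, if_neg hxm]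
            · rw [if_neg (by simpa using hym), ihm (x :: xs) y,
                pvInsertBy_cons (fun a b : Int => decide (a < b)) y x xs]
              by_cases hyx : y < x
              · rw [if_pos (by simpa using hyx), pvMerge_cons_cons m y ms (x :: xs), if_neg hym]
              · rw [if_neg (by simpa using hyx), pvMerge_cons_cons m x ms _, if_neg hxm]

-- the mins phase of A's insertion sort builds a tagged sorted-min list
lemma pvFoldT (l : List Int) : ∀ (acc : List Int),
    List.foldl (fun acc x => PySem.List.insertBy (fun a b : Int × Bool => decide (a.1 < b.1)) x acc)
        (acc.map (fun i => (i, true))) (l.map (fun i => (i, true)))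
      = (List.foldl (fun acc x => PySem.List.insertBy (fun a b : Int => decide (a < b)) x acc) acc l).map
          (fun i => (i, true)) := by
  induction l with
  | nil => intro acc; rfl
  | cons x xs ih =>
      intro acc
      simp only [List.map_cons, List.foldl_cons]
      rw [pvInsert_mapT, ih]

-- the maxes phase merges each max into the merged list
lemma pvFoldF (l : List Int) : ∀ (ms xs : List Int),
    List.foldl (fun acc x => PySem.List.insertBy (fun a b : Int × Bool => decide (a.1 < b.1)) x acc)
        (pvMerge ms xs) (l.map (fun i => (i, false)))
      = pvMerge ms (List.foldl (fun acc x => PySem.List.insertBy (fun a b : Int => decide (a < b)) x acc) xs l) := by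
  induction l with
  | nil => intro ms xs; rfl
  | cons x l ih =>
      intro ms xs
      simp only [List.map_cons, List.foldl_cons]
      rw [pvInsert_merge, ih]

-- A's stable sort of the tagged concatenation IS the stable merge of the two plain sorts
lemma pvSorted_merge (minarr maxarr : List Int) :
    PySem.List.sorted (minarr.map (fun i => (i, true)) ++ maxarr.map (fun i => (i, false)))
        (fun e => e.1) false
      = pvMerge (PySem.List.sorted minarr (fun x => x) false)
          (PySem.List.sorted maxarr (fun x => x) false) := by
  rw [PySem.List.sorted_eq_foldl_insertBy, PySem.List.sorted_eq_foldl_insertBy,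
    PySem.List.sorted_eq_foldl_insertBy, List.foldl_append]
  have h0 : (([] : List (Int × Bool))) = (([] : List Int)).map (fun i => (i, true)) := rfl
  rw [h0, pvFoldT minarr []]
  rw [← pvMerge_nil_right, pvFoldF]

-- pvMerge of a min boundary splits the maxes at that boundary
lemma pvMerge_cons_split (m : Int) (ms : List Int) : ∀ (xs : List Int),
    pvMerge (m :: ms) xs
      = (pvSplitLt m xs).1.map (fun x => (x, false)) ++ (m, true) :: pvMerge ms (pvSplitLt m xs).2 := by
  intro xs
  induction xs with
  | nil => rw [pvMerge_cons_nil, pvSplitLt]; simp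
  | cons x xs ih =>
      rw [pvMerge_cons_cons, pvSplitLt]
      by_cases h : x < m
      · simp only [h, if_true]
        rw [ih]; rfl
      · simp [h]

-- folding A's step over a pure-max segment leaves acc alone and runs B's best loop
lemma pvFold_seg (valarr : List Int) (fs : List Int) : ∀ (acc : List (Option Int)) (s : Option Int) (v : Int),
    List.foldl (pvStepA valarr) (acc, s, v) (fs.map (fun i => (i, false)))
      = (acc, List.foldl (pvStepB valarr) (s, v) fs) := by
  induction fs with
  | nil => intro acc s v; rfl
  | cons f fs ih =>
      intro acc s v
      simp only [List.map_cons, List.foldl_cons]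
      have : pvStepA valarr (acc, s, v) (f, false)
          = (acc, pvStepB valarr (s, v) f) := by
        simp only [pvStepA, pvStepB]
        by_cases h : v ≤ PySem.List.pyGetD valarr f 0 <;> simp [h]
      rw [this]
      rcases hp : pvStepB valarr (s, v) f with ⟨s', v'⟩
      exact ih acc s' v'

-- the main loop correspondence: A's scan of the merged list = B's segment recursion
lemma pvMain (valarr : List Int) (ms : List Int) : ∀ (xs : List Int) (acc : List (Option Int)),
    (let r := List.foldl (pvStepA valarr) (acc, none, 0) (pvMerge ms xs)
     r.1 ++ [r.2.1]) = pvGo valarr ms xs acc := by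
  induction ms with
  | nil =>
      intro xs acc
      rw [pvMerge_nil, pvGo]
      show (let r := List.foldl (pvStepA valarr) (acc, none, 0) (xs.map (fun x => (x, false)))
            r.1 ++ [r.2.1]) = acc ++ [pvSegBest valarr xs]
      rw [pvFold_seg valarr xs acc none 0]
      rfl
  | cons m ms ih =>
      intro xs acc
      rw [pvMerge_cons_split, List.foldl_append, pvFold_seg valarr _ acc none 0, List.foldl_cons]
      have hstep : pvStepA valarr (acc, List.foldl (pvStepB valarr) (none, 0) (pvSplitLt m xs).1) (m, true)
          = ((if pvTruthy (pvSegBest valarr (pvSplitLt m xs).1) then acc ++ [pvSegBest valarr (pvSplitLt m xs).1] else acc), none, 0) := by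
        simp only [pvStepA, if_pos, pvSegBest]; rfl
      rw [hstep, ih (pvSplitLt m xs).2]
      rw [pvGo]

-- ===== VERDICT (by name: the statement is the Claim_ definition above) =====
theorem findSignificantMaxs_spec : Claim_equal_findSignificantMaxs := by
  intro minarr maxarr valarr _hdom _hpre
  show findSignificantMaxs minarr maxarr valarr = findSignificantMaxs_alt minarr maxarr valarr
  rw [findSignificantMaxs_eq, pvSorted_merge]
  exact pvMain valarr _ _ _
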